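-- pv_equiv track=rewrite | github.com/koder-ua/prest | prest/__init__.py | make_rest_patch
-- ===== SOURCE A (Python) =====
-- def make_rest_patch(old, new):
--     old_keys = set(old.keys())
--     new_keys = set(new.keys())
--     patch = {new_key: new[new_key] for new_key in new_keys - old_keys}
--
--     for same_key in old_keys & new_keys:
--         if old[same_key] != new[same_key]:
--             patch[same_key] = new[same_key]
--
--     assert set() == (old_keys - new_keys)
--     return patch
-- ===== SOURCE B (Python) =====
-- def make_rest_patch(old, new):
--     # sort-merge: walk both key sequences in sorted order with a pointer into
--     # the old keys; an old key the pointer never consumes was removed -> assert.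
--     old_sorted = sorted(old)
--     added, changed = [], []
--     i = 0
--     for k in sorted(new):
--         v = new[k]
--         if i < len(old_sorted) and old_sorted[i] == k:
--             if old[k] != v:
--                 changed.append((k, v))
--             i += 1
--         else:
--             added.append((k, v))
--     assert i == len(old_sorted)
--     return dict(added + changed)
-- ===== Notes on version B (the rewrite author's own statement) =====
-- stated objective: alternative
-- what changed: B replaces A's hash-set algebra (key-set difference plus a second pass over the key-set intersection) with a sort-merge: both key sequences are sorted and walked with a two-pointer merge that classifies each new key as added or changed and detects removed keys (A's assert) as unconsumed old keys.
import Mathlib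
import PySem

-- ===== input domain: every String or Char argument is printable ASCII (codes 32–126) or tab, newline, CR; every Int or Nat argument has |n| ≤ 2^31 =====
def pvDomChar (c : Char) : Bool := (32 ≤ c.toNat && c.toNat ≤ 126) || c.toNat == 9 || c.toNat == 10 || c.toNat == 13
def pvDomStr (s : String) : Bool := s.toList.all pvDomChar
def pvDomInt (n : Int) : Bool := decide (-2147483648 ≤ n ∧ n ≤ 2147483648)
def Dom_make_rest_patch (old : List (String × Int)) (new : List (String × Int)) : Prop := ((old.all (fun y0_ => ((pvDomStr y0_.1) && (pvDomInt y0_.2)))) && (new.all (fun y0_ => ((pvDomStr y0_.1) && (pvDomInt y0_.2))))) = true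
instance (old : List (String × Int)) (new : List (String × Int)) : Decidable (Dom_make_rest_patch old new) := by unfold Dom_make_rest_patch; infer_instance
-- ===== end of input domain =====

-- B replaces A's hash-set algebra (key-set difference, then a pass over the key-set
-- intersection) by a sort-merge: both key sequences sorted, one two-pointer merge
-- classifying each new key as added or changed; objective: alternative.

-- ===== PORT A =====
-- Python iterates `new_keys - old_keys` and `old_keys & new_keys` in hash order, which is
-- randomized for str keys; the returned dict is order-insensitive as a Python value
-- (outputs are compared as dicts), so the port fixes SORTED iteration order for both sets.
-- `new[k]` / `old[k]` are only evaluated on keys present in the dict, so `getD` with a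
-- dummy default is exact there. The final `assert set() == old_keys - new_keys` raises
-- exactly when old has a key missing from new; those inputs are excluded by
-- Pre_make_rest_patch.
def make_rest_patch (old : List (String × Int)) (new : List (String × Int)) : List (String × Int) :=
  let oldD : PySem.Dict String Int := PySem.Dict.mk old
  let newD : PySem.Dict String Int := PySem.Dict.mk new
  let old_keys : PySem.Set String := PySem.Set.ofList oldD.keys
  let new_keys : PySem.Set String := PySem.Set.ofList newD.keys
  let patch0 : PySem.Dict String Int :=
    (PySem.List.sorted (PySem.Set.diff new_keys old_keys) (fun x => x)).foldl
      (fun d k => d.insert k (newD.getD k 0)) PySem.Dict.empty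
  let patch : PySem.Dict String Int :=
    (PySem.List.sorted (PySem.Set.inter old_keys new_keys) (fun x => x)).foldl
      (fun d k => if oldD.getD k 0 ≠ newD.getD k 0 then d.insert k (newD.getD k 0) else d) patch0
  patch.items


-- ===== PORT B =====
-- sort-merge over sorted(old) / sorted(new) with pointer st.1 into old_sorted;
-- `i < len(old_sorted) and old_sorted[i] == k` is exactly `old_sorted[st.1]? = some k`.
-- The final `assert i == len(old_sorted)` raises exactly where A's assert does — those
-- inputs are excluded by Pre_make_rest_patch.
def make_rest_patch_alt (old : List (String × Int)) (new : List (String × Int)) : List (String × Int) :=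
  let oldD : PySem.Dict String Int := PySem.Dict.mk old
  let newD : PySem.Dict String Int := PySem.Dict.mk new
  let old_sorted := PySem.List.sorted oldD.keys (fun x => x)
  let st := (PySem.List.sorted newD.keys (fun x => x)).foldl
      (fun (st : Nat × List (String × Int) × List (String × Int)) k =>
        let v := newD.getD k 0
        if old_sorted[st.1]? = some k then
          (st.1 + 1, st.2.1, if oldD.getD k 0 ≠ v then st.2.2 ++ [(k, v)] else st.2.2)
        else
          (st.1, st.2.1 ++ [(k, v)], st.2.2))
      (0, ([], []))
  (PySem.Dict.ofList (st.2.1 ++ st.2.2)).items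


-- ===== PRECONDITION & SPEC =====
-- Excluded: association lists with duplicate keys (they do not represent any Python dict,
-- which is the declared argument type), and inputs where old has a key missing from new —
-- there both A's and B's assert raise AssertionError.
def Pre_make_rest_patch (old : List (String × Int)) (new : List (String × Int)) : Prop :=
  (old.map (fun p => p.1)).Nodup ∧ (new.map (fun p => p.1)).Nodup ∧
  ∀ k ∈ old.map (fun p => p.1), k ∈ new.map (fun p => p.1)
instance (old : List (String × Int)) (new : List (String × Int)) : Decidable (Pre_make_rest_patch old new) := by unfold Pre_make_rest_patch; infer_instance

def pvWitness_make_rest_patch : (List (String × Int)) × (List (String × Int)) :=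
  ([("a", 1), ("c", 5)], [("a", 2), ("b", 3), ("c", 5)])

def Spec_make_rest_patch (old : List (String × Int)) (new : List (String × Int)) (out : List (String × Int)) : Prop := out = make_rest_patch_alt old new
instance (old : List (String × Int)) (new : List (String × Int)) (out : List (String × Int)) : Decidable (Spec_make_rest_patch old new out) := by unfold Spec_make_rest_patch; infer_instance

-- ===== CLAIM (what is proved, stated in full; the proofs are below) =====
def Claim_equal_make_rest_patch : Prop := ∀ (old : List (String × Int)) (new : List (String × Int)), Dom_make_rest_patch old new → Pre_make_rest_patch old new → Spec_make_rest_patch old new (make_rest_patch old new)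

-- ===== LEMMAS AND PROOFS =====

-- the common canonical form: walk the sorted new keys, added keys (not in old) then
-- changed keys (in old, value differs), each block in sorted key order
def pvQ1 (old : List (String × Int)) (k : String) : Bool :=
  !(PySem.Set.contains (old.map (fun p => p.1)) k)
def pvQ2 (old new : List (String × Int)) (k : String) : Bool :=
  PySem.Set.contains (old.map (fun p => p.1)) k &&
    decide ((PySem.Dict.mk old).getD k 0 ≠ (PySem.Dict.mk new).getD k 0)
def pvPair (new : List (String × Int)) (k : String) : String × Int :=
  (k, (PySem.Dict.mk new).getD k 0)

def pvSN (new : List (String × Int)) : List String :=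
  PySem.List.sorted (new.map (fun p => p.1)) (fun x => x)
def pvCanon (old new : List (String × Int)) : List (String × Int) :=
  ((pvSN new).filter (pvQ1 old)).map (pvPair new) ++
  ((pvSN new).filter (pvQ2 old new)).map (pvPair new)

lemma pv_merge (old new : List (String × Int)) :
    ∀ (sn : List String) (i : Nat) (a c : List (String × Int)),
      sn.Pairwise (· < ·) →
      ((PySem.List.sorted (PySem.Dict.mk old).keys (fun x => x)).drop i).Pairwise (· < ·) →
      (∀ x ∈ sn, pvQ1 old x = false → x ∈ (PySem.List.sorted (PySem.Dict.mk old).keys (fun x => x)).drop i) →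
      (∀ x ∈ (PySem.List.sorted (PySem.Dict.mk old).keys (fun x => x)).drop i, x ∈ sn ∧ pvQ1 old x = false) →
      (List.foldl
        (fun (st : Nat × List (String × Int) × List (String × Int)) k =>
          if (PySem.List.sorted (PySem.Dict.mk old).keys (fun x => x))[st.1]? = some k then
            (st.1 + 1, st.2.1,
              if (PySem.Dict.mk old).getD k 0 ≠ (PySem.Dict.mk new).getD k 0 then
                st.2.2 ++ [(k, (PySem.Dict.mk new).getD k 0)]
              else st.2.2)
          else (st.1, st.2.1 ++ [(k, (PySem.Dict.mk new).getD k 0)], st.2.2))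
        (i, (a, c)) sn).2
      = (a ++ (sn.filter (pvQ1 old)).map (pvPair new),
         c ++ (sn.filter (pvQ2 old new)).map (pvPair new)) := by
  intro sn
  induction sn with
  | nil => intro i a c _ _ _ _; simp
  | cons k t ih =>
    intro i a c hsn hdrop h1 h2
    have hkt : ∀ x ∈ t, k < x := (List.pairwise_cons.mp hsn).1
    have htp : t.Pairwise (· < ·) := (List.pairwise_cons.mp hsn).2
    rw [List.foldl_cons]
    by_cases hq : pvQ1 old k = false
    · -- k is an old key: the pointer must be sitting exactly on k
      have hkd : k ∈ (PySem.List.sorted (PySem.Dict.mk old).keys (fun x => x)).drop i := h1 k (List.mem_cons_self) hq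
      have hhead : (PySem.List.sorted (PySem.Dict.mk old).keys (fun x => x)).drop i = k :: (PySem.List.sorted (PySem.Dict.mk old).keys (fun x => x)).drop (i + 1) := by
        cases hd : (PySem.List.sorted (PySem.Dict.mk old).keys (fun x => x)).drop i with
        | nil => rw [hd] at hkd; cases hkd
        | cons h rest =>
          have hh : h = k := by
            have hhmem : h ∈ (PySem.List.sorted (PySem.Dict.mk old).keys (fun x => x)).drop i := by rw [hd]; exact List.mem_cons_self
            have hhsn := (h2 h hhmem).1
            rcases List.mem_cons.mp hhsn with heq | hht
            · exact heq
            · exfalso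
              have hkh : k < h := hkt h hht
              rw [hd] at hkd
              rcases List.mem_cons.mp hkd with heq | hkr
              · exact absurd heq (ne_of_lt hkh)
              · have : h < k := by
                  have := (List.pairwise_cons.mp (by rw [hd] at hdrop; exact hdrop)).1
                  exact this k hkr
                exact absurd rfl (ne_of_lt (lt_trans hkh this)).symm
          have htail : rest = (PySem.List.sorted (PySem.Dict.mk old).keys (fun x => x)).drop (i + 1) := by
            have h0 : ((PySem.List.sorted (PySem.Dict.mk old).keys (fun x => x)).drop i).tail = (PySem.List.sorted (PySem.Dict.mk old).keys (fun x => x)).drop (i + 1) := List.tail_drop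
            rw [hd] at h0; simpa using h0
          rw [hh, htail]
      have hcond : (PySem.List.sorted (PySem.Dict.mk old).keys (fun x => x))[i]? = some k := by
        have : ((PySem.List.sorted (PySem.Dict.mk old).keys (fun x => x)).drop i)[0]? = some k := by rw [hhead]; rfl
        rw [List.getElem?_drop] at this; simpa using this
      rw [if_pos hcond]
      have hdrop' : ((PySem.List.sorted (PySem.Dict.mk old).keys (fun x => x)).drop (i + 1)).Pairwise (· < ·) := by
        rw [hhead] at hdrop; exact (List.pairwise_cons.mp hdrop).2
      have hknotin : k ∉ (PySem.List.sorted (PySem.Dict.mk old).keys (fun x => x)).drop (i + 1) := by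
        intro hmem
        have := (List.pairwise_cons.mp (by rw [hhead] at hdrop; exact hdrop)).1 k hmem
        exact absurd rfl (ne_of_lt this)
      have h1' : ∀ x ∈ t, pvQ1 old x = false → x ∈ (PySem.List.sorted (PySem.Dict.mk old).keys (fun x => x)).drop (i + 1) := by
        intro x hx hqx
        have := h1 x (List.mem_cons_of_mem _ hx) hqx
        rw [hhead] at this
        rcases List.mem_cons.mp this with heq | hmem
        · exact absurd heq (ne_of_gt (hkt x hx))
        · exact hmem
      have h2' : ∀ x ∈ (PySem.List.sorted (PySem.Dict.mk old).keys (fun x => x)).drop (i + 1), x ∈ t ∧ pvQ1 old x = false := by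
        intro x hx
        have hx' : x ∈ (PySem.List.sorted (PySem.Dict.mk old).keys (fun x => x)).drop i := by rw [hhead]; exact List.mem_cons_of_mem _ hx
        obtain ⟨hxsn, hxq⟩ := h2 x hx'
        refine ⟨?_, hxq⟩
        rcases List.mem_cons.mp hxsn with heq | hmem
        · exact absurd (heq ▸ hx) hknotin
        · exact hmem
      have hcont : PySem.Set.contains (old.map (fun p => p.1)) k = true := by
        unfold pvQ1 at hq; simpa using hq
      have hfq1 : pvQ1 old k = false := hq
      by_cases hdiff : (PySem.Dict.mk old).getD k 0 ≠ (PySem.Dict.mk new).getD k 0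
      · rw [if_pos hdiff]
        have := ih (i + 1) a (c ++ [(k, (PySem.Dict.mk new).getD k 0)]) htp hdrop' h1' h2'
        rw [this]
        have hq2 : pvQ2 old new k = true := by unfold pvQ2; rw [hcont]; simp [hdiff]
        simp [hfq1, hq2, pvPair]
      · rw [if_neg hdiff]
        have := ih (i + 1) a c htp hdrop' h1' h2'
        rw [this]
        have hq2 : pvQ2 old new k = false := by unfold pvQ2; simp [hdiff]
        simp [hfq1, hq2]
    · -- k is a new-only key: the pointer cannot match
      have hqt : pvQ1 old k = true := by revert hq; cases pvQ1 old k <;> simp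
      have hcond : ¬ ((PySem.List.sorted (PySem.Dict.mk old).keys (fun x => x))[i]? = some k) := by
        intro hc
        obtain ⟨hlt, hget⟩ := List.getElem?_eq_some_iff.mp hc
        have hkd : k ∈ (PySem.List.sorted (PySem.Dict.mk old).keys (fun x => x)).drop i := by
          rw [List.drop_eq_getElem_cons hlt, hget]; exact List.mem_cons_self
        have := (h2 k hkd).2
        rw [hqt] at this; cases this
      rw [if_neg hcond]
      have h1' : ∀ x ∈ t, pvQ1 old x = false → x ∈ (PySem.List.sorted (PySem.Dict.mk old).keys (fun x => x)).drop i := by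
        intro x hx hqx; exact h1 x (List.mem_cons_of_mem _ hx) hqx
      have h2' : ∀ x ∈ (PySem.List.sorted (PySem.Dict.mk old).keys (fun x => x)).drop i, x ∈ t ∧ pvQ1 old x = false := by
        intro x hx
        obtain ⟨hxsn, hxq⟩ := h2 x hx
        refine ⟨?_, hxq⟩
        rcases List.mem_cons.mp hxsn with heq | hmem
        · rw [heq] at hxq; rw [hqt] at hxq; cases hxq
        · exact hmem
      have := ih i (a ++ [(k, (PySem.Dict.mk new).getD k 0)]) c htp hdrop h1' h2'
      rw [this]
      have hcf : PySem.Set.contains (old.map (fun p => p.1)) k = false := by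
        unfold pvQ1 at hqt; revert hqt
        cases PySem.Set.contains (old.map (fun p => p.1)) k <;> simp
      have hq2 : pvQ2 old new k = false := by
        unfold pvQ2; rw [hcf]; simp
      simp [hqt, hq2, pvPair]

lemma pv_contains_iff (l : List String) (x : String) :
    PySem.Set.contains l x = true ↔ x ∈ l := by
  simp [PySem.Set.contains]

lemma pv_strict (l : List String) (h : l.Nodup) :
    (PySem.List.sorted l (fun x => x)).Pairwise (· < ·) := by
  have hle := PySem.List.sorted_pairwise l (fun x => x)
  have hnd : (PySem.List.sorted l (fun x => x)).Nodup :=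
    ((PySem.List.sorted_perm l (fun x => x) false).nodup_iff).mpr h
  exact (hle.and hnd).imp (fun h => lt_of_le_of_ne h.1 h.2)

lemma pv_nodup_canon_keys (old new : List (String × Int))
    (hn : (new.map (fun p => p.1)).Nodup) :
    (((pvSN new).filter (pvQ1 old)) ++ ((pvSN new).filter (pvQ2 old new))).Nodup := by
  have hsnd : (pvSN new).Nodup :=
    ((PySem.List.sorted_perm _ (fun x => x) false).nodup_iff).mpr hn
  apply List.Nodup.append (hsnd.filter _) (hsnd.filter _)
  intro k hk1 hk2
  have h1 := (List.mem_filter.1 hk1).2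
  have h2 := (List.mem_filter.1 hk2).2
  unfold pvQ1 at h1; unfold pvQ2 at h2
  rw [Bool.and_eq_true] at h2
  rw [h2.1] at h1; cases h1

lemma pv_keys_old (old : List (String × Int)) :
    (PySem.Dict.mk old).keys = old.map (fun p => p.1) := PySem.Dict.keys_mk old

lemma pv_b_eq (old new : List (String × Int)) (h : Pre_make_rest_patch old new) :
    make_rest_patch_alt old new = pvCanon old new := by
  obtain ⟨ho, hn, hsub⟩ := h
  have hok := pv_keys_old old
  have hnk := pv_keys_old new
  have hmerge := pv_merge old new
    (PySem.List.sorted (PySem.Dict.mk new).keys (fun x => x)) 0 [] []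
    (by rw [hnk]; exact pv_strict _ hn)
    (by simp only [List.drop_zero]; rw [hok]; exact pv_strict _ ho)
    (by
      intro x hx hqx
      simp only [List.drop_zero]
      rw [PySem.List.mem_sorted, hok]
      unfold pvQ1 at hqx
      have : PySem.Set.contains (old.map (fun p => p.1)) x = true := by
        revert hqx; cases PySem.Set.contains (old.map (fun p => p.1)) x <;> simp
      exact (pv_contains_iff _ _).mp this)
    (by
      intro x hx
      simp only [List.drop_zero] at hx
      rw [PySem.List.mem_sorted, hok] at hx
      constructor
      · rw [PySem.List.mem_sorted, hnk]; exact hsub x hx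
      · unfold pvQ1
        rw [(pv_contains_iff _ _).mpr hx]; rfl)
  have h1 : (List.foldl
      (fun (st : Nat × List (String × Int) × List (String × Int)) k =>
        if (PySem.List.sorted (PySem.Dict.mk old).keys (fun x => x))[st.1]? = some k then
          (st.1 + 1, st.2.1,
            if (PySem.Dict.mk old).getD k 0 ≠ (PySem.Dict.mk new).getD k 0 then
              st.2.2 ++ [(k, (PySem.Dict.mk new).getD k 0)]
            else st.2.2)
        else (st.1, st.2.1 ++ [(k, (PySem.Dict.mk new).getD k 0)], st.2.2))
      (0, ([], [])) (PySem.List.sorted (PySem.Dict.mk new).keys (fun x => x))).2.1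
      = ((PySem.List.sorted (PySem.Dict.mk new).keys (fun x => x)).filter (pvQ1 old)).map (pvPair new) := by
    rw [hmerge]; simp
  have h2 : (List.foldl
      (fun (st : Nat × List (String × Int) × List (String × Int)) k =>
        if (PySem.List.sorted (PySem.Dict.mk old).keys (fun x => x))[st.1]? = some k then
          (st.1 + 1, st.2.1,
            if (PySem.Dict.mk old).getD k 0 ≠ (PySem.Dict.mk new).getD k 0 then
              st.2.2 ++ [(k, (PySem.Dict.mk new).getD k 0)]
            else st.2.2)
        else (st.1, st.2.1 ++ [(k, (PySem.Dict.mk new).getD k 0)], st.2.2))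
      (0, ([], [])) (PySem.List.sorted (PySem.Dict.mk new).keys (fun x => x))).2.2
      = ((PySem.List.sorted (PySem.Dict.mk new).keys (fun x => x)).filter (pvQ2 old new)).map (pvPair new) := by
    rw [hmerge]; simp
  unfold make_rest_patch_alt
  simp only []
  rw [h1, h2]
  have hsneq : PySem.List.sorted (PySem.Dict.mk new).keys (fun x => x) = pvSN new := by
    rw [hnk]; rfl
  rw [hsneq]
  -- dict(added + changed): all keys distinct, so items are exactly the pairs
  simp only [PySem.Dict.ofList, PySem.Dict.update]
  have hfresh : ∀ a ∈ ((pvSN new).filter (pvQ1 old)).map (pvPair new) ++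
      ((pvSN new).filter (pvQ2 old new)).map (pvPair new),
      (PySem.Dict.empty : PySem.Dict String Int).contains a.1 = false := by
    intro a _; exact PySem.Dict.contains_empty _
  have hnodup : ((((pvSN new).filter (pvQ1 old)).map (pvPair new) ++
      ((pvSN new).filter (pvQ2 old new)).map (pvPair new)).map (fun p => p.1)).Nodup := by
    have := pv_nodup_canon_keys old new hn
    simpa [List.map_map, pvPair, Function.comp_def] using this
  have := PySem.Dict.items_foldl_insert_fresh
    (l := ((pvSN new).filter (pvQ1 old)).map (pvPair new) ++
      ((pvSN new).filter (pvQ2 old new)).map (pvPair new))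
    (k := fun p => p.1) (v := fun p => p.2) (d := PySem.Dict.empty) hfresh hnodup
  unfold pvCanon
  simpa [PySem.Dict.empty] using this

lemma pv_a_eq (old new : List (String × Int)) (h : Pre_make_rest_patch old new) :
    make_rest_patch old new = pvCanon old new := by
  obtain ⟨ho, hn, hsub⟩ := h
  have hok := pv_keys_old old
  have hnk := pv_keys_old new
  have hOset : PySem.Set.ofList (PySem.Dict.mk old).keys = old.map (fun p => p.1) := by
    rw [hok]; exact PySem.Set.ofList_eq_self_of_nodup _ ho
  have hNset : PySem.Set.ofList (PySem.Dict.mk new).keys = new.map (fun p => p.1) := by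
    rw [hnk]; exact PySem.Set.ofList_eq_self_of_nodup _ hn
  have hsnd : (pvSN new).Nodup :=
    ((PySem.List.sorted_perm _ (fun x => x) false).nodup_iff).mpr hn
  -- the set difference, iterated in sorted order, is the added-keys block
  have hL1 : PySem.List.sorted
      (PySem.Set.diff (PySem.Set.ofList (PySem.Dict.mk new).keys)
        (PySem.Set.ofList (PySem.Dict.mk old).keys)) (fun x => x)
      = (pvSN new).filter (pvQ1 old) := by
    rw [hOset, hNset]
    apply PySem.List.sorted_eq_of_perm_of_pairwise_lt
    · exact (PySem.List.sorted_perm (new.map (fun p => p.1)) (fun x => x) false).filter _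
    · exact (pv_strict _ hn).filter _
  -- the set intersection, iterated in sorted order, is the common-keys block
  have hL2 : PySem.List.sorted
      (PySem.Set.inter (PySem.Set.ofList (PySem.Dict.mk old).keys)
        (PySem.Set.ofList (PySem.Dict.mk new).keys)) (fun x => x)
      = (pvSN new).filter (fun x => PySem.Set.contains (old.map (fun p => p.1)) x) := by
    rw [hOset, hNset]
    apply PySem.List.sorted_eq_of_perm_of_pairwise_lt
    · apply (List.perm_ext_iff_of_nodup (hsnd.filter _) ((ho.filter _))).mpr
      intro x
      simp only [List.mem_filter]
      rw [pv_contains_iff, pv_contains_iff]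
      unfold pvSN
      rw [PySem.List.mem_sorted]
      tauto
    · exact (pv_strict _ hn).filter _
  unfold make_rest_patch
  simp only []
  rw [hL1, hL2]
  rw [PySem.List.foldl_ite_eq_foldl_filter
    (p := fun k => (PySem.Dict.mk old).getD k 0 ≠ (PySem.Dict.mk new).getD k 0)]
  rw [List.filter_filter]
  have hfc : ((pvSN new).filter
      (fun a => decide ((PySem.Dict.mk old).getD a 0 ≠ (PySem.Dict.mk new).getD a 0) &&
        PySem.Set.contains (old.map (fun p => p.1)) a))
      = (pvSN new).filter (pvQ2 old new) := by
    apply List.filter_congr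
    intro k _
    unfold pvQ2
    exact Bool.and_comm _ _
  rw [hfc]
  -- first loop: fresh inserts into the empty dict
  have hp0 := PySem.Dict.items_foldl_insert_fresh
    (l := (pvSN new).filter (pvQ1 old)) (k := fun k => k)
    (v := fun k => (PySem.Dict.mk new).getD k 0) (d := PySem.Dict.empty)
    (by intro a _; exact PySem.Dict.contains_empty _)
    (by simpa using hsnd.filter _)
  -- second loop: fresh inserts (changed keys are disjoint from added keys)
  have hp1 := PySem.Dict.items_foldl_insert_fresh
    (l := (pvSN new).filter (pvQ2 old new)) (k := fun k => k)
    (v := fun k => (PySem.Dict.mk new).getD k 0)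
    (d := (List.foldl (fun d k => d.insert k ((PySem.Dict.mk new).getD k 0))
      PySem.Dict.empty ((pvSN new).filter (pvQ1 old))))
    (by
      intro a ha
      rw [PySem.Dict.contains_eq_decide_mem_keys]
      simp only [PySem.Dict.keys, hp0]
      rw [decide_eq_false_iff_not]
      intro hmem
      simp only [PySem.Dict.empty, List.nil_append, List.map_map, List.mem_map] at hmem
      obtain ⟨b, hb, hba⟩ := hmem
      have hq1 := (List.mem_filter.1 hb).2
      have hq2 := (List.mem_filter.1 ha).2
      unfold pvQ1 at hq1
      unfold pvQ2 at hq2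
      rw [Bool.and_eq_true] at hq2
      have hba' : b = a := hba
      rw [hba'] at hq1
      rw [hq2.1] at hq1; cases hq1)
    (by simpa using hsnd.filter _)
  rw [hp1, hp0]
  unfold pvCanon
  simp [PySem.Dict.empty]
  rfl

-- ===== VERDICT (by name: the statement is the Claim_ definition above) =====
theorem make_rest_patch_spec : Claim_equal_make_rest_patch := by
  intro old new _ hpre
  unfold Spec_make_rest_patch
  rw [pv_a_eq old new hpre, pv_b_eq old new hpre]
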